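-- pv_equiv track=rewrite | github.com/optivent/skills_fabric | src/skills_fabric/mcp/r_server.py | _extract_roxygen
-- ===== SOURCE A (Python) =====
-- from typing import Optional, Any
--
-- def _extract_roxygen(lines: list[str], end_line: int) -> Optional[str]:
--     """Extract roxygen2 documentation above a function."""
--     doc_lines = []
--
--     for i in range(end_line - 1, -1, -1):
--         line = lines[i].strip()
--         if line.startswith("#'"):
--             doc_lines.insert(0, line[2:].strip())
--         elif line.startswith('#'):
--             continue  # Regular comment, keep looking
--         elif not line:
--             continue  # Empty line
--         else:
--             break  # Hit code
--
--     if doc_lines: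
--         return '\n'.join(doc_lines)
--     return None
-- ===== SOURCE B (Python) =====
-- from typing import Optional, Any
--
-- def _extract_roxygen(lines: list[str], end_line: int) -> Optional[str]:
--     """Extract roxygen2 documentation above a function (two-pass version)."""
--     # Pass 1: scan backward only to find where the comment/blank block starts.
--     start = end_line
--     for i in range(end_line - 1, -1, -1):
--         s = lines[i].strip()
--         if s.startswith("#'") or s.startswith('#') or not s:
--             start = i
--         else:
--             break
--     # Pass 2: collect the roxygen lines forward.
--     docs = [lines[i].strip()[2:].strip()
--             for i in range(start, end_line)
--             if lines[i].strip().startswith("#'")]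
--     return '\n'.join(docs) if docs else None
-- ===== Notes on version B (the rewrite author's own statement) =====
-- stated objective: alternative
-- what changed: Replaces A's single backward scan that prepends with insert(0) into two differently-shaped passes: a backward boundary search that only records the block start index, then a forward comprehension that filters and transforms the roxygen lines.
import Mathlib
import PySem

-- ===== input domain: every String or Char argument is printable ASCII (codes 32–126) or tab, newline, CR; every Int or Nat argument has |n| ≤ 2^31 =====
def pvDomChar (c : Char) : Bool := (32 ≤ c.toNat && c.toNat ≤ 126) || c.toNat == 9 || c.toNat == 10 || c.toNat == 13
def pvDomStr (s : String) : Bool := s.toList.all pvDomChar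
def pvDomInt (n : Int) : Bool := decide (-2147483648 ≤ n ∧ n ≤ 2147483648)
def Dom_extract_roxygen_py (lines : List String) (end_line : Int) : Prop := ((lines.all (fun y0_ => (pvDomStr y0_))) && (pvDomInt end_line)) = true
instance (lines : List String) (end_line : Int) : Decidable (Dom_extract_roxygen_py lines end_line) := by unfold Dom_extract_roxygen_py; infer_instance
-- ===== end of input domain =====

-- B separates A's single backward prepend-loop into a backward boundary search plus a forward
-- filtering comprehension (alternative decomposition, same cost).


-- ===== PORT A =====
-- A's loop 'for i in range(end_line-1,-1,-1)': fuel n stands for i+1, so the body at fuel n+1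
-- processes lines[n]; doc_lines.insert(0, x) is prepending to the accumulator.
def aLoop (lines : List String) : Nat → List String → List String
  | 0, acc => acc
  | n+1, acc =>
    let line := PySem.Str.strip (lines.getD n "")
    if PySem.Str.startswith line "#'" then
      aLoop lines n ((PySem.Str.strip (PySem.Str.slice line (some 2) none)) :: acc)
    else if PySem.Str.startswith line "#" then
      aLoop lines n acc
    else if line = "" then
      aLoop lines n acc
    else
      acc

def extract_roxygen_py (lines : List String) (end_line : Int) : Option String :=
  let doc_lines := aLoop lines end_line.toNat []
  if doc_lines ≠ [] then some (PySem.Str.join "\n" doc_lines) else none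

-- ===== PORT B =====
-- B's pass 1: backward scan carrying only the current 'start'; fuel n+1 looks at lines[n].
def bStart (lines : List String) : Nat → Nat → Nat
  | 0, start => start
  | n+1, start =>
    let s := PySem.Str.strip (lines.getD n "")
    if PySem.Str.startswith s "#'" || PySem.Str.startswith s "#" || s == "" then
      bStart lines n n
    else
      start

def extract_roxygen_py_alt (lines : List String) (end_line : Int) : Option String :=
  let e := end_line.toNat
  let start := bStart lines e e
  let docs := (List.range' start (e - start)).filterMap (fun i =>
    let s := PySem.Str.strip (lines.getD i "")
    if PySem.Str.startswith s "#'" then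
      some (PySem.Str.strip (PySem.Str.slice s (some 2) none))
    else none)
  if docs ≠ [] then some (PySem.Str.join "\n" docs) else none

-- ===== PRECONDITION & SPEC =====
-- A indexes lines[end_line-1] downward, so it raises IndexError iff end_line > len(lines);
-- Pre_ admits exactly the inputs on which A returns.
def Pre_extract_roxygen_py (lines : List String) (end_line : Int) : Prop :=
  end_line ≤ (lines.length : Int)
instance (lines : List String) (end_line : Int) : Decidable (Pre_extract_roxygen_py lines end_line) := by unfold Pre_extract_roxygen_py; infer_instance

def pvWitness_extract_roxygen_py : List String × Int := (["#' doc", "f <- function()"], 1)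

def Spec_extract_roxygen_py (lines : List String) (end_line : Int) (out : Option String) : Prop := out = extract_roxygen_py_alt lines end_line
instance (lines : List String) (end_line : Int) (out : Option String) : Decidable (Spec_extract_roxygen_py lines end_line out) := by unfold Spec_extract_roxygen_py; infer_instance

-- ===== CLAIM (what is proved, stated in full; the proofs are below) =====
def Claim_equal_extract_roxygen_py : Prop := ∀ (lines : List String) (end_line : Int), Dom_extract_roxygen_py lines end_line → Pre_extract_roxygen_py lines end_line → Spec_extract_roxygen_py lines end_line (extract_roxygen_py lines end_line)

-- ===== LEMMAS AND PROOFS =====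

-- B's per-line extractor, named for the proofs only.
def pvF (lines : List String) (i : Nat) : Option String :=
  let s := PySem.Str.strip (lines.getD i "")
  if PySem.Str.startswith s "#'" then
    some (PySem.Str.strip (PySem.Str.slice s (some 2) none))
  else none

theorem bStart_le (lines : List String) : ∀ n, bStart lines n n ≤ n := by
  intro n
  induction n with
  | zero => simp [bStart]
  | succ n ih =>
    simp only [bStart, List.getD_eq_getElem?_getD]
    by_cases h : (PySem.Str.startswith (PySem.Str.strip (lines[n]?.getD "")) "#'" ||
        PySem.Str.startswith (PySem.Str.strip (lines[n]?.getD "")) "#" ||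
        PySem.Str.strip (lines[n]?.getD "") == "") = true
    · simp only [h, if_true]
      exact le_trans ih (Nat.le_succ n)
    · simp only [h, if_false, Bool.false_eq_true]
      exact le_refl _

theorem range'_concat_of_le {a n : ℕ} (h : a ≤ n) :
    List.range' a (n + 1 - a) = List.range' a (n - a) ++ [n] := by
  have h1 : n + 1 - a = (n - a) + 1 := by omega
  rw [h1, List.range'_1_concat]
  congr 2
  omega

theorem aLoop_eq (lines : List String) :
    ∀ n acc, aLoop lines n acc =
      (List.range' (bStart lines n n) (n - bStart lines n n)).filterMap (pvF lines) ++ acc := by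
  intro n
  induction n with
  | zero => intro acc; simp [aLoop, bStart]
  | succ n ih =>
    intro acc
    have hle := bStart_le lines n
    simp only [aLoop, bStart, List.getD_eq_getElem?_getD]
    by_cases h1 : PySem.Str.startswith (PySem.Str.strip (lines[n]?.getD "")) "#'" = true
    · have hf : pvF lines n = some (PySem.Str.strip
          (PySem.Str.slice (PySem.Str.strip (lines[n]?.getD "")) (some 2) none)) := by
        simp only [pvF, List.getD_eq_getElem?_getD, h1, if_true]
      simp only [h1, Bool.true_or, if_true]
      rw [ih, range'_concat_of_le hle]
      simp [hf]
    · have hf : pvF lines n = none := by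
        simp only [pvF, List.getD_eq_getElem?_getD, h1, if_false, Bool.false_eq_true]
      by_cases h2 : PySem.Str.startswith (PySem.Str.strip (lines[n]?.getD "")) "#" = true
      · simp only [h1, h2, Bool.false_eq_true, if_false, Bool.or_true, Bool.true_or, if_true]
        rw [ih, range'_concat_of_le hle]
        simp [hf]
      · have h1' : PySem.Str.startswith (PySem.Str.strip (lines[n]?.getD "")) "#'" = false :=
          Bool.eq_false_iff.mpr (fun hc => h1 hc)
        have h2' : PySem.Str.startswith (PySem.Str.strip (lines[n]?.getD "")) "#" = false :=
          Bool.eq_false_iff.mpr (fun hc => h2 hc)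
        by_cases h3 : PySem.Str.strip (lines[n]?.getD "") = ""
        · have h3b : (PySem.Str.strip (lines[n]?.getD "") == "") = true := beq_iff_eq.mpr h3
          simp only [h1', h2', h3b, Bool.false_eq_true, if_false, Bool.or_true, if_true]
          rw [if_pos h3, ih, range'_concat_of_le hle]
          simp [hf]
        · have h3b : (PySem.Str.strip (lines[n]?.getD "") == "") = false := by
            simp [h3]
          simp only [h1', h2', h3b, Bool.false_eq_true, if_false, Bool.or_false]
          rw [if_neg h3]
          simp

-- ===== VERDICT (by name: the statement is the Claim_ definition above) =====
theorem extract_roxygen_py_spec : Claim_equal_extract_roxygen_py := by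
  intro lines end_line _ _
  unfold Spec_extract_roxygen_py extract_roxygen_py extract_roxygen_py_alt
  rw [aLoop_eq, List.append_nil]
  rfl
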